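-- pv_equiv track=rewrite | github.com/Shakib-GH-Ahmed/hl7_siu_parser | hl7_siu_parser/hl7.py | split_messages
-- ===== SOURCE A (Python) =====
-- from typing import Dict, List, Optional
--
-- def normalize_newlines(raw: str) -> str:
--     # HL7 segments are carriage-return separated, but real files vary.
--     raw = raw.replace("\r\n", "\r").replace("\n", "\r")
--     # Remove BOM or weird leading whitespace without breaking HL7 positions
--     return raw.lstrip("\ufeff")
--
-- def split_messages(raw: str) -> List[str]:
--     """
--     Split a file that may contain multiple HL7 messages.
--     Uses 'MSH' at the start of a segment line as the boundary.
--     """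
--     raw = normalize_newlines(raw)
--     segments = [s for s in raw.split("\r") if s.strip()]
--
--     msh_indexes = [i for i, seg in enumerate(segments) if seg.startswith("MSH")]
--     if not msh_indexes:
--         return []
--
--     messages: List[str] = []
--     for idx, start in enumerate(msh_indexes):
--         end = msh_indexes[idx + 1] if idx + 1 < len(msh_indexes) else len(segments)
--         messages.append("\r".join(segments[start:end]) + "\r")
--     return messages
-- ===== SOURCE B (Python) =====
-- from typing import List
--
-- def split_messages(raw: str) -> List[str]:
--     """
--     Split a file that may contain multiple HL7 messages.
--     Single pass: accumulate segments into the current message, starting a new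
--     one at each segment that begins with 'MSH'; segments before the first MSH
--     are dropped.
--     """
--     raw = raw.replace("\r\n", "\r").replace("\n", "\r").lstrip("\ufeff")
--     messages: List[str] = []
--     current = None
--     for seg in raw.split("\r"):
--         if not seg.strip():
--             continue
--         if seg.startswith("MSH"):
--             if current is not None:
--                 messages.append("\r".join(current) + "\r")
--             current = [seg]
--         elif current is not None:
--             current.append(seg)
--     if current is not None:
--         messages.append("\r".join(current) + "\r")
--     return messages
-- ===== Notes on version B (the rewrite author's own statement) =====
-- stated objective: simpler
-- what changed: B drops the msh_indexes table and the slice arithmetic: one pass over the segments accumulates the current message and flushes it at each MSH boundary, flushing the last one after the loop.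
import Mathlib
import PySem

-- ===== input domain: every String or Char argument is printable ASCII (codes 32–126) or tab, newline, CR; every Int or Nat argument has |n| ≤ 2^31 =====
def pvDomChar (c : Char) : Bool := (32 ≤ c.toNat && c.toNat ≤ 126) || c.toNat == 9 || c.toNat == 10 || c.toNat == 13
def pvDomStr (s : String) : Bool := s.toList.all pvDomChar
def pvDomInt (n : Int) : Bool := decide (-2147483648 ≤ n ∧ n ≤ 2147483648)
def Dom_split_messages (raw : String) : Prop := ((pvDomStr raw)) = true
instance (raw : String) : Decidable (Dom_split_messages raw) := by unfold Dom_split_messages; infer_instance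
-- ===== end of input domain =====

-- B replaces A's msh_indexes table and slice arithmetic by a single pass that accumulates
-- the current message and flushes it at each MSH segment (objective: simpler).


-- ===== PORT A =====
-- Ported at the PySem.Chars (List Char) level; .lstrip("\ufeff") is the dropWhile of the
-- single-character strip set (exact).
def normalize_newlines (raw : String) : List Char :=
  (PySem.Chars.replace (PySem.Chars.replace raw.toList ['\r', '\n'] ['\r']) ['\n'] ['\r']).dropWhile
    (fun c => c == '\ufeff')

def split_messages (raw : String) : List String :=
  let raw := normalize_newlines raw
  let segments := (PySem.Chars.splitOn raw ['\r']).filter (fun s => PySem.Chars.strip s != [])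
  let msh_indexes := (PySem.List.enumerate segments).filterMap
    (fun p => if PySem.Chars.startswith p.2 ['M', 'S', 'H'] then some p.1 else none)
  if msh_indexes = [] then []
  else
    (PySem.List.enumerate msh_indexes).foldl
      (fun messages p =>
        let e : Int := if p.1 + 1 < (msh_indexes.length : Int)
          then (PySem.List.pyGet? msh_indexes (p.1 + 1)).getD 0  -- guarded: index in range
          else (segments.length : Int)
        messages ++
          [String.mk (PySem.Chars.join ['\r'] (PySem.List.slice segments (some p.2) (some e)) ++ ['\r'])])
      []

-- ===== PORT B =====
def split_messages_alt (raw : String) : List String :=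
  let raw := (PySem.Chars.replace (PySem.Chars.replace raw.toList ['\r', '\n'] ['\r']) ['\n'] ['\r']).dropWhile
    (fun c => c == '\ufeff')
  let st := (PySem.Chars.splitOn raw ['\r']).foldl
    (fun (st : List String × Option (List (List Char))) seg =>
      if PySem.Chars.strip seg == [] then st
      else if PySem.Chars.startswith seg ['M', 'S', 'H'] then
        match st.2 with
        | some cur => (st.1 ++ [String.mk (PySem.Chars.join ['\r'] cur ++ ['\r'])], some [seg])
        | none => (st.1, some [seg])
      else
        match st.2 with
        | some cur => (st.1, some (cur ++ [seg]))
        | none => st)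
    ([], none)
  match st.2 with
  | some cur => st.1 ++ [String.mk (PySem.Chars.join ['\r'] cur ++ ['\r'])]
  | none => st.1

-- ===== PRECONDITION & SPEC =====
def Spec_split_messages (raw : String) (out : List String) : Prop := out = split_messages_alt raw
instance (raw : String) (out : List String) : Decidable (Spec_split_messages raw out) := by
  unfold Spec_split_messages; infer_instance

-- ===== CLAIM (what is proved, stated in full; the proofs are below) =====
def Claim_equal_split_messages : Prop :=
  ∀ (raw : String), Dom_split_messages raw → Spec_split_messages raw (split_messages raw)

-- ===== LEMMAS AND PROOFS =====

/-- A segment that starts a message. -/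
def pvIsMSH (s : List Char) : Bool := PySem.Chars.startswith s ['M', 'S', 'H']

/-- A non-blank segment (Python truthiness of `s.strip()`). -/
def pvKeep (s : List Char) : Bool := PySem.Chars.strip s != []

/-- `"\r".join(msg) + "\r"` as a `String`. -/
def pvMkMsg (l : List (List Char)) : String := String.mk (PySem.Chars.join ['\r'] l ++ ['\r'])

/-- Reference splitter: skip to the first MSH segment, then group maximal runs. -/
def pvMsgs : List (List Char) → List String
  | [] => []
  | s :: t =>
    if pvIsMSH s then
      pvMkMsg (s :: t.takeWhile (fun x => !pvIsMSH x)) :: pvMsgs (t.dropWhile (fun x => !pvIsMSH x))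
    else pvMsgs t
termination_by l => l.length
decreasing_by
  · simpa [Nat.lt_succ_iff] using List.length_dropWhile_le (fun x => !pvIsMSH x) t
  · simp

/-- A's slice loop as a recursion over the index list. -/
def pvPairs (segs : List (List Char)) : List Int → List String
  | [] => []
  | [i] => [pvMkMsg (PySem.List.slice segs (some i) (some (segs.length : Int)))]
  | i :: j :: r => pvMkMsg (PySem.List.slice segs (some i) (some j)) :: pvPairs segs (j :: r)

/-- A's index list, with a general enumerate start. -/
def pvIdx (s : Int) (segs : List (List Char)) : List Int :=
  (PySem.List.enumerate segs s).filterMap (fun p => if pvIsMSH p.2 then some p.1 else none)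

theorem pvIdx_cons (s : Int) (x : List Char) (t : List (List Char)) :
    pvIdx s (x :: t) = (if pvIsMSH x then [s] else []) ++ pvIdx (s + 1) t := by
  simp only [pvIdx, PySem.List.enumerate_cons, List.filterMap_cons]
  split <;> simp_all

theorem pvIdx_shift (t : List (List Char)) : ∀ s : Int, pvIdx (s + 1) t = (pvIdx s t).map (· + 1) := by
  induction t with
  | nil => intro s; simp [pvIdx]
  | cons x u ih =>
    intro s
    rw [pvIdx_cons, pvIdx_cons, ih (s + 1)]
    split <;> simp

theorem pvIdx_nonneg (t : List (List Char)) : ∀ (s i : Int), i ∈ pvIdx s t → s ≤ i := by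
  induction t with
  | nil => intro s i h; simp [pvIdx] at h
  | cons x u ih =>
    intro s i h
    rw [pvIdx_cons] at h
    rcases List.mem_append.1 h with h | h
    · split at h <;> simp_all
    · have := ih (s + 1) i h; omega

theorem pvIdx_nil_iff (t : List (List Char)) : pvIdx 0 t = [] ↔ ∀ x ∈ t, pvIsMSH x = false := by
  induction t with
  | nil => simp [pvIdx]
  | cons x u ih =>
    rw [pvIdx_cons, pvIdx_shift]
    constructor
    · intro h
      split at h
      · simp at h
      · intro y hy
        rcases List.mem_cons.1 hy with hy | hy
        · simp_all
        · exact (ih.1 (by simpa using h)) y (by simpa using hy)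
    · intro h
      have hx := h x (by simp)
      simp [hx]
      exact ih.2 (fun y hy => h y (by simp [hy]))

theorem pvIdx_head (t : List (List Char)) : ∀ (i : Int) (r : List Int), pvIdx 0 t = i :: r →
    t.take i.toNat = t.takeWhile (fun x => !pvIsMSH x) ∧
    t.drop i.toNat = t.dropWhile (fun x => !pvIsMSH x) := by
  induction t with
  | nil => intro i r h; simp [pvIdx] at h
  | cons x u ih =>
    intro i r h
    rw [pvIdx_cons, pvIdx_shift] at h
    by_cases hx : pvIsMSH x
    · simp [hx] at h
      obtain ⟨hi, -⟩ := h
      simp [← hi, List.takeWhile_cons, List.dropWhile_cons, hx]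
    · simp [hx] at h
      rcases hu : pvIdx 0 u with _ | ⟨i', r'⟩
      · rw [hu] at h; simp at h
      · rw [hu] at h; simp at h
        obtain ⟨hi, -⟩ := h
        have hnn : (0 : Int) ≤ i' := pvIdx_nonneg u 0 i' (by simp [hu])
        have : i.toNat = i'.toNat + 1 := by omega
        obtain ⟨h1, h2⟩ := ih i' r' hu
        simp [this, List.takeWhile_cons, List.dropWhile_cons, hx, h1, h2]

theorem pvPairs_shift (s : List Char) (t : List (List Char)) :
    ∀ idxs : List Int, (∀ i ∈ idxs, 0 ≤ i) →
      pvPairs (s :: t) (idxs.map (· + 1)) = pvPairs t idxs := by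
  intro idxs
  induction idxs with
  | nil => intro _; simp [pvPairs]
  | cons i rest ih =>
    intro hnn
    have hi : 0 ≤ i := hnn i (by simp)
    rcases rest with _ | ⟨j, r⟩
    · simp only [List.map_cons, List.map_nil, pvPairs]
      rw [PySem.List.slice_toNat _ (by omega) (by positivity),
          PySem.List.slice_toNat _ hi (by positivity)]
      congr 2
      have h1 : (i + 1).toNat = i.toNat + 1 := by omega
      have h2 : ((t.length : Int) + 1).toNat = t.length + 1 := by omega
      have h3 : ((t.length : Int)).toNat = t.length := by omega
      simp [h1, h2, h3]
    · have hj : 0 ≤ j := hnn j (by simp)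
      simp only [List.map_cons, pvPairs]
      rw [PySem.List.slice_toNat _ (by omega) (by omega), PySem.List.slice_toNat _ hi hj]
      have h1 : (i + 1).toNat = i.toNat + 1 := by omega
      have h2 : (j + 1).toNat = j.toNat + 1 := by omega
      rw [show ((j + 1) :: List.map (fun x => x + 1) r) = List.map (fun x => x + 1) (j :: r) from by simp,
        ih (fun k hk => hnn k (by simp [hk]))]
      simp [h1, h2]

theorem pvMsgs_dropWhile (t : List (List Char)) :
    pvMsgs (t.dropWhile (fun x => !pvIsMSH x)) = pvMsgs t := by
  induction t with
  | nil => simp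
  | cons x u ih =>
    by_cases hx : pvIsMSH x
    · simp [List.dropWhile_cons, hx]
    · rw [List.dropWhile_cons]
      simp only [hx]
      rw [pvMsgs]
      simp [hx, ih]

theorem pvMsgs_of_no_msh (t : List (List Char)) (h : ∀ x ∈ t, pvIsMSH x = false) :
    pvMsgs t = [] := by
  induction t with
  | nil => simp [pvMsgs]
  | cons x u ih =>
    rw [pvMsgs]
    simp [h x (by simp)]
    exact ih (fun y hy => h y (by simp [hy]))

theorem pvMsgs_cons_msh (s : List Char) (t : List (List Char)) (hs : pvIsMSH s = true) :
    pvMsgs (s :: t) = pvMkMsg (s :: t.takeWhile (fun x => !pvIsMSH x)) ::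
      pvMsgs (t.dropWhile (fun x => !pvIsMSH x)) := by
  rw [pvMsgs]; simp [hs]

theorem pvMsgs_cons_not (s : List Char) (t : List (List Char)) (hs : pvIsMSH s = false) :
    pvMsgs (s :: t) = pvMsgs t := by
  rw [pvMsgs]; simp [hs]

/-- The A-side core equals the reference splitter. -/
theorem pvPairs_eq_msgs : ∀ segs : List (List Char), pvPairs segs (pvIdx 0 segs) = pvMsgs segs := by
  intro segs
  induction segs with
  | nil => simp [pvIdx, pvPairs, pvMsgs]
  | cons s t ih =>
    rw [pvIdx_cons, pvIdx_shift]
    have hnn := fun i hi => pvIdx_nonneg t 0 i hi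
    by_cases hs : pvIsMSH s
    · simp only [hs, if_pos, List.singleton_append]
      rcases hJ : pvIdx 0 t with _ | ⟨i, r⟩
      · have hno := (pvIdx_nil_iff t).1 hJ
        have htw : List.takeWhile (fun x => !pvIsMSH x) t = t :=
          List.takeWhile_eq_self_iff.2 (fun x hx => by simp [hno x hx])
        have hdw : List.dropWhile (fun x => !pvIsMSH x) t = [] :=
          List.dropWhile_eq_nil_iff.2 (fun x hx => by simp [hno x hx])
        simp only [hJ, List.map_nil, pvPairs]
        rw [PySem.List.slice_toNat _ le_rfl (by positivity)]
        rw [pvMsgs]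
        simp [hs, htw, hdw, pvMsgs, Int.toNat_natCast, List.take_of_length_le]
      · have hi : (0 : Int) ≤ i := hnn i (by simp [hJ])
        simp only [hJ, List.map_cons, pvPairs]
        rw [pvMsgs]
        simp only [hs, if_pos]
        obtain ⟨htk, -⟩ := pvIdx_head t i r hJ
        have h1 : pvMkMsg (PySem.List.slice (s :: t) (some 0) (some (i + 1))) =
            pvMkMsg (s :: List.takeWhile (fun x => !pvIsMSH x) t) := by
          rw [PySem.List.slice_toNat _ le_rfl (by omega)]
          have hnat : (i + 1).toNat = i.toNat + 1 := by omega
          simp [hnat, htk]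
        have h2 : pvPairs (s :: t) ((i + 1) :: List.map (· + 1) r) =
            pvMsgs (List.dropWhile (fun x => !pvIsMSH x) t) := by
          have hsh := pvPairs_shift s t (i :: r) (fun k hk => hnn k (by rw [hJ]; exact hk))
          simp only [List.map_cons] at hsh
          rw [hsh, ← hJ, ih, ← pvMsgs_dropWhile t]
        rw [h1, h2]
    · have hsf : pvIsMSH s = false := by simpa using hs
      simp only [hsf, Bool.false_eq_true, if_false, List.nil_append]
      rw [pvPairs_shift s t _ hnn, ih]
      rw [pvMsgs]
      simp [hsf]

/-- B's loop step after the blank-segment filter. -/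
def pvStep (st : List String × Option (List (List Char))) (seg : List Char) :
    List String × Option (List (List Char)) :=
  if PySem.Chars.strip seg == [] then st
  else if PySem.Chars.startswith seg ['M', 'S', 'H'] then
    match st.2 with
    | some cur => (st.1 ++ [String.mk (PySem.Chars.join ['\r'] cur ++ ['\r'])], some [seg])
    | none => (st.1, some [seg])
  else
    match st.2 with
    | some cur => (st.1, some (cur ++ [seg]))
    | none => st

def pvFlush (st : List String × Option (List (List Char))) : List String :=
  match st.2 with
  | some cur => st.1 ++ [String.mk (PySem.Chars.join ['\r'] cur ++ ['\r'])]
  | none => st.1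

theorem pvB_go (l : List (List Char)) : ∀ (msgs : List String) (c : List (List Char)),
    pvFlush (l.foldl pvStep (msgs, some c)) =
      msgs ++ pvMkMsg (c ++ (l.filter pvKeep).takeWhile (fun x => !pvIsMSH x)) ::
        pvMsgs ((l.filter pvKeep).dropWhile (fun x => !pvIsMSH x)) := by
  induction l with
  | nil => intro msgs c; simp [pvFlush, pvMkMsg, pvMsgs]
  | cons seg t ih =>
    intro msgs c
    rw [List.foldl_cons]
    by_cases hb : (PySem.Chars.strip seg == []) = true
    · have hk : pvKeep seg = false := by simp [pvKeep]; simpa using hb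
      rw [show pvStep (msgs, some c) seg = (msgs, some c) from by simp [pvStep, hb]]
      rw [ih]
      simp [List.filter_cons, hk]
    · have hk : pvKeep seg = true := by simp [pvKeep]; simpa using hb
      by_cases hm : PySem.Chars.startswith seg ['M', 'S', 'H'] = true
      · have hM : pvIsMSH seg = true := hm
        rw [show pvStep (msgs, some c) seg =
            (msgs ++ [String.mk (PySem.Chars.join ['\r'] c ++ ['\r'])], some [seg]) from by
          simp [pvStep, hb, hm]]
        rw [ih]
        simp only [List.filter_cons, hk, if_pos]
        rw [List.takeWhile_cons, List.dropWhile_cons]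
        simp only [hM, Bool.not_true, Bool.false_eq_true, if_false]
        rw [pvMsgs_cons_msh seg _ hM]
        simp [pvMkMsg]
      · have hM : pvIsMSH seg = false := by simpa [pvIsMSH] using hm
        rw [show pvStep (msgs, some c) seg = (msgs, some (c ++ [seg])) from by
          simp [pvStep, hb, hm]]
        rw [ih]
        simp [List.filter_cons, hk, List.takeWhile_cons, List.dropWhile_cons, hM]

theorem pvB_none (l : List (List Char)) : ∀ msgs : List String,
    pvFlush (l.foldl pvStep (msgs, none)) = msgs ++ pvMsgs (l.filter pvKeep) := by
  induction l with
  | nil => intro msgs; simp [pvFlush, pvMsgs]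
  | cons seg t ih =>
    intro msgs
    rw [List.foldl_cons]
    by_cases hb : (PySem.Chars.strip seg == []) = true
    · have hk : pvKeep seg = false := by simp [pvKeep]; simpa using hb
      rw [show pvStep (msgs, none) seg = (msgs, none) from by simp [pvStep, hb]]
      rw [ih]
      simp [List.filter_cons, hk]
    · have hk : pvKeep seg = true := by simp [pvKeep]; simpa using hb
      by_cases hm : PySem.Chars.startswith seg ['M', 'S', 'H'] = true
      · have hM : pvIsMSH seg = true := hm
        rw [show pvStep (msgs, none) seg = (msgs, some [seg]) from by simp [pvStep, hb, hm]]
        rw [pvB_go]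
        simp only [List.filter_cons, hk, if_pos]
        rw [pvMsgs_cons_msh seg _ hM]
        simp [pvMkMsg]
      · have hM : pvIsMSH seg = false := by simpa [pvIsMSH] using hm
        rw [show pvStep (msgs, none) seg = (msgs, none) from by simp [pvStep, hb, hm]]
        rw [ih]
        simp only [List.filter_cons, hk, if_pos]
        rw [pvMsgs_cons_not seg _ hM]

/-- A's enumerate-with-next-lookup map equals the pairwise recursion. -/
theorem pvA_map_pairs (segs : List (List Char)) :
    ∀ (idxs pref : List Int),
      (PySem.List.enumerate idxs (pref.length : Int)).map (fun p =>
        pvMkMsg (PySem.List.slice segs (some p.2)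
          (some (if p.1 + 1 < ((pref ++ idxs).length : Int)
            then (PySem.List.pyGet? (pref ++ idxs) (p.1 + 1)).getD 0
            else (segs.length : Int))))) = pvPairs segs idxs := by
  intro idxs
  induction idxs with
  | nil => intro pref; simp [pvPairs]
  | cons i rest ih =>
    intro pref
    rw [PySem.List.enumerate_cons]
    rcases rest with _ | ⟨j, r⟩
    · simp [pvPairs]
    · have hcast : (pref.length : Int) + 1 = ((pref.length + 1 : Nat) : Int) := by push_cast; ring
      have hget : (PySem.List.pyGet? (pref ++ i :: j :: r) ((pref.length : Int) + 1)).getD 0 = j := by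
        rw [hcast, PySem.List.pyGet?_natCast]
        rw [List.getElem?_append_right (by omega)]
        simp
      simp only [List.map_cons, pvPairs]
      congr 1
      · rw [if_pos (by simp), hget]
      · have := ih (pref ++ [i])
        rw [← this]
        have hlen : ((pref ++ [i]).length : Int) = (pref.length : Int) + 1 := by simp
        rw [hlen]
        apply List.map_congr_left
        intro p hp
        congr 2
        have hl1 : ((pref ++ i :: j :: r).length : Int) = ((pref ++ [i] ++ j :: r).length : Int) := by
          simp
        rw [hl1]
        have hl2 : pref ++ i :: j :: r = (pref ++ [i]) ++ j :: r := by simp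
        rw [hl2]

/-- The common preprocessing: normalized text split on CR, blanks removed. -/
def pvSegsOf (raw : String) : List (List Char) :=
  (PySem.Chars.splitOn (normalize_newlines raw) ['\r']).filter pvKeep

theorem pvA_eq (raw : String) : split_messages raw = pvMsgs (pvSegsOf raw) := by
  have hkeep : (fun s => PySem.Chars.strip s != []) = pvKeep := by funext s; simp [pvKeep]
  unfold split_messages
  simp only [hkeep]
  rw [show (PySem.Chars.splitOn (normalize_newlines raw) ['\r']).filter pvKeep = pvSegsOf raw from rfl]
  rw [show (PySem.List.enumerate (pvSegsOf raw)).filterMap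
      (fun p => if PySem.Chars.startswith p.2 ['M', 'S', 'H'] then some p.1 else none) =
      pvIdx 0 (pvSegsOf raw) from rfl]
  rw [PySem.List.foldl_append_singleton_eq_map, List.nil_append]
  have h := pvA_map_pairs (pvSegsOf raw) (pvIdx 0 (pvSegsOf raw)) []
  simp only [List.nil_append, List.length_nil, Nat.cast_zero, pvMkMsg] at h
  rw [h, pvPairs_eq_msgs]
  split
  · next hnil => rw [pvMsgs_of_no_msh _ ((pvIdx_nil_iff _).1 hnil)]
  · rfl

theorem pvB_eq (raw : String) : split_messages_alt raw = pvMsgs (pvSegsOf raw) := by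
  show pvFlush ((PySem.Chars.splitOn (normalize_newlines raw) ['\r']).foldl pvStep ([], none)) = _
  rw [pvB_none]
  simp [pvSegsOf]

-- ===== VERDICT (by name: the statement is the Claim_ definition above) =====
theorem split_messages_spec : Claim_equal_split_messages := by
  intro raw _
  unfold Spec_split_messages
  rw [pvA_eq, pvB_eq]
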